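-- pv_equiv track=rewrite | github.com/d41689/ValuePilot | backend/app/services/edgar_ingestion.py | _recent_quarters
-- ===== SOURCE A (Python) =====
-- def _recent_quarters(year: int, month: int, n: int) -> list[str]:
--     """Return last N quarters in YYYY-Qn format, most recent first."""
--     qtr = (month - 1) // 3 + 1
--     result = []
--     for _ in range(n):
--         result.append(f"{year}-Q{qtr}")
--         qtr -= 1
--         if qtr == 0:
--             qtr = 4
--             year -= 1
--     return result
-- ===== SOURCE B (Python) =====
-- def _recent_quarters(year: int, month: int, n: int) -> list[str]:
--     """Return last N quarters in YYYY-Qn format, most recent first."""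
--     base = year * 4 + (month - 1) // 3
--     return [f"{(base - i) // 4}-Q{(base - i) % 4 + 1}" for i in range(n)]
-- ===== Notes on version B (the rewrite author's own statement) =====
-- stated objective: simpler
-- what changed: Replaces A's mutable (qtr, year) state with its decrement-and-wraparound branch by a single closed-form quarter index base = year*4 + (month-1)//3, reading each label off base - i with floor division and modulo.
-- outside the precondition, e.g. on _recent_quarters(2020, 0, 1): A returns ['2020-Q0'], B returns ['2019-Q4']; on _recent_quarters(2020, 14, 1): A returns ['2020-Q5'], B returns ['2021-Q1']
import Mathlib
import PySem

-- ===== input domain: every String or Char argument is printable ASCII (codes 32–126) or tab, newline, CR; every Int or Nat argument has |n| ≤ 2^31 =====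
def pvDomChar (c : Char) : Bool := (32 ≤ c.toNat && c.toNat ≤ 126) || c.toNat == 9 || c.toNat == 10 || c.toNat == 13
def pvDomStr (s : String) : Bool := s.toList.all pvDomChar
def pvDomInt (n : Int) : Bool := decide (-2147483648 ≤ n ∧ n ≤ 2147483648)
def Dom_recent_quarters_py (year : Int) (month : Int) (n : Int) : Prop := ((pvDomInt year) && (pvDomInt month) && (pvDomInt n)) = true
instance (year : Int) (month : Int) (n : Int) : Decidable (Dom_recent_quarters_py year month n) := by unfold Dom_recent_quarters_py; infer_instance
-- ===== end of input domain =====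

-- B replaces A's mutable (qtr, year) state and wraparound branch by a closed-form quarter
-- index base = year*4 + (month-1)//3, reading each label off base - i (objective: simpler).

-- f"{y}-Q{q}" (shared rendering helper; exact: PySem.Int.toChars = str(n))
def pvLabel (y q : Int) : String :=
  String.ofList (PySem.Int.toChars y ++ ('-' :: 'Q' :: PySem.Int.toChars q))

-- ===== PORT A =====
def recent_quarters_py (year : Int) (month : Int) (n : Int) : List String :=
  let qtr := PySem.Int.floordiv (month - 1) 3 + 1
  let st := (PySem.List.pyRange 0 n 1).foldl
    (fun (s : Int × Int × List String) _ =>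
      let result := s.2.2 ++ [pvLabel s.1 s.2.1]
      let qtr := s.2.1 - 1
      if qtr = 0 then (s.1 - 1, 4, result) else (s.1, qtr, result))
    (year, qtr, ([] : List String))
  st.2.2

-- ===== PORT B =====
def recent_quarters_py_alt (year : Int) (month : Int) (n : Int) : List String :=
  let base := year * 4 + PySem.Int.floordiv (month - 1) 3
  (PySem.List.pyRange 0 n 1).map (fun i =>
    pvLabel (PySem.Int.floordiv (base - i) 4) (PySem.Int.mod (base - i) 4 + 1))

-- ===== PRECONDITION & SPEC =====
-- Pre_ excludes only requests for n ≥ 1 quarters at a month outside the calendar range 1..12: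
-- there A's labels (e.g. "2020-Q0", "2020-Q5", negative quarters) are accidents of its
-- leftover-state wraparound and matching them would contort B; year and n are unrestricted,
-- and n ≤ 0 is allowed for every month (both return []).
def Pre_recent_quarters_py (year : Int) (month : Int) (n : Int) : Prop :=
  (1 ≤ month ∧ month ≤ 12) ∨ n ≤ 0
instance (year : Int) (month : Int) (n : Int) : Decidable (Pre_recent_quarters_py year month n) := by unfold Pre_recent_quarters_py; infer_instance
def pvWitness_recent_quarters_py : Int × Int × Int := (2024, 11, 5)

def Spec_recent_quarters_py (year : Int) (month : Int) (n : Int) (out : List String) : Prop := out = recent_quarters_py_alt year month n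
instance (year : Int) (month : Int) (n : Int) (out : List String) : Decidable (Spec_recent_quarters_py year month n out) := by unfold Spec_recent_quarters_py; infer_instance

-- ===== CLAIM (what is proved, stated in full; the proofs are below) =====
def Claim_equal_recent_quarters_py : Prop := ∀ (year : Int) (month : Int) (n : Int), Dom_recent_quarters_py year month n → Pre_recent_quarters_py year month n → Spec_recent_quarters_py year month n (recent_quarters_py year month n)

-- ===== LEMMAS AND PROOFS =====

-- proof-side helper: the closed-form label list starting at quarter index b, length m
def pvTail (b : Int) : Nat → List String
  | 0 => []
  | m + 1 =>
      pvLabel (PySem.Int.floordiv b 4) (PySem.Int.mod b 4 + 1) :: pvTail (b - 1) m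

lemma pvLabel_closed (y q : Int) (h1 : 1 ≤ q) (h4 : q ≤ 4) :
    pvLabel (PySem.Int.floordiv (y * 4 + (q - 1)) 4) (PySem.Int.mod (y * 4 + (q - 1)) 4 + 1)
      = pvLabel y q := by
  have hd : PySem.Int.floordiv (y * 4 + (q - 1)) 4 = y := by
    rw [PySem.Int.floordiv_eq_iff_of_pos (by norm_num)]; omega
  have hm : PySem.Int.mod (y * 4 + (q - 1)) 4 = q - 1 := by
    rw [PySem.Int.mod_eq_emod_of_pos (by norm_num)]; omega
  rw [hd, hm]; ring_nf

-- A's loop, run over any index list from a valid state, produces the closed-form labels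
lemma loopA_eq (l : List Int) : ∀ (y q : Int) (acc : List String), 1 ≤ q → q ≤ 4 →
    (l.foldl
      (fun (s : Int × Int × List String) _ =>
        let result := s.2.2 ++ [pvLabel s.1 s.2.1]
        let qtr := s.2.1 - 1
        if qtr = 0 then (s.1 - 1, 4, result) else (s.1, qtr, result))
      (y, q, acc)).2.2
      = acc ++ pvTail (y * 4 + (q - 1)) l.length := by
  induction l with
  | nil => intro y q acc _ _; simp [pvTail]
  | cons a t ih =>
    intro y q acc h1 h4
    simp only [List.foldl_cons, List.length_cons, pvTail]
    by_cases hq : q - 1 = 0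
    · rw [if_pos hq]
      rw [ih (y - 1) 4 (acc ++ [pvLabel y q]) (by norm_num) (by norm_num)]
      rw [List.append_assoc, List.singleton_append]
      rw [show (y - 1) * 4 + ((4 : Int) - 1) = y * 4 + (q - 1) - 1 by omega,
        pvLabel_closed y q h1 h4]
    · rw [if_neg hq]
      rw [ih y (q - 1) (acc ++ [pvLabel y q]) (by omega) (by omega)]
      rw [List.append_assoc, List.singleton_append]
      rw [show y * 4 + (q - 1 - 1) = y * 4 + (q - 1) - 1 by omega,
        pvLabel_closed y q h1 h4]

-- B's map over a shifted range produces the same closed-form labels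
lemma mapB_eq : ∀ (m : Nat) (a b : Int),
    (PySem.List.pyRange a (a + m) 1).map
      (fun i => pvLabel (PySem.Int.floordiv (b + a - i) 4) (PySem.Int.mod (b + a - i) 4 + 1))
      = pvTail b m := by
  intro m
  induction m with
  | zero => intro a b; simp [PySem.List.pyRange_one_eq_nil le_rfl, pvTail]
  | succ m ih =>
    intro a b
    push_cast
    rw [show a + ((m : Int) + 1) = (a + 1) + m by ring,
      PySem.List.pyRange_one_cons (by omega), List.map_cons]
    simp only [pvTail]
    congr 1
    · rw [show b + a - a = b by ring]
    · rw [show (fun i => pvLabel (PySem.Int.floordiv (b + a - i) 4)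
            (PySem.Int.mod (b + a - i) 4 + 1))
          = (fun i => pvLabel (PySem.Int.floordiv ((b - 1) + (a + 1) - i) 4)
            (PySem.Int.mod ((b - 1) + (a + 1) - i) 4 + 1)) by
          funext i; rw [show b + a - i = (b - 1) + (a + 1) - i by ring]]
      exact ih (a + 1) (b - 1)

-- ===== VERDICT (by name: the statement is the Claim_ definition above) =====
theorem recent_quarters_py_spec : Claim_equal_recent_quarters_py := by
  intro year month n _ hpre
  unfold Spec_recent_quarters_py recent_quarters_py recent_quarters_py_alt
  by_cases hn : n ≤ 0
  · rw [PySem.List.pyRange_one_eq_nil hn]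
    simp
  · obtain ⟨h1, h12⟩ := hpre.resolve_right hn
    set q := PySem.Int.floordiv (month - 1) 3 + 1 with hq
    have hfd : PySem.Int.floordiv (month - 1) 3 = (month - 1) / 3 :=
      PySem.Int.floordiv_eq_ediv_of_pos (by norm_num)
    have hq1 : 1 ≤ q := by rw [hq, hfd]; omega
    have hq4 : q ≤ 4 := by rw [hq, hfd]; omega
    simp only []
    rw [loopA_eq _ year q [] hq1 hq4, List.nil_append]
    have hb : year * 4 + PySem.Int.floordiv (month - 1) 3
        = (year * 4 + (q - 1)) + 0 := by rw [hq]; ring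
    rw [PySem.List.length_pyRange_one, show n - 0 = n by ring, hb]
    rw [show n = ((n.toNat : Int)) by omega]
    have hm := mapB_eq n.toNat 0 (year * 4 + (q - 1))
    rw [zero_add] at hm
    rw [Int.toNat_natCast, ← hm]
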